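-- pv_equiv track=rewrite | github.com/sloth8890/pizzaz-cinema | pizzaz.py | total_seat_calc
-- ===== SOURCE A (Python) =====
-- def total_seat_calc(room_num): #available seat calculater by substituting the room number
--     if room_num == 1:
--         total_allowed_seat = 35
--     elif room_num == 2:
--         total_allowed_seat = 136
--     else:
--         total_allowed_seat = 42
--     cnt = 0
--     i = 1
--     while i <= total_allowed_seat:
--         cnt+=1
--         i +=2 #considering the social distancing
--     return cnt
-- ===== SOURCE B (Python) =====
-- def total_seat_calc(room_num):
--     if room_num == 1:
--         total_allowed_seat = 35
--     elif room_num == 2: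
--         total_allowed_seat = 136
--     else:
--         total_allowed_seat = 42
--     return (total_allowed_seat + 1) // 2
-- ===== Notes on version B (the rewrite author's own statement) =====
-- stated objective: simpler
-- what changed: Replaced the while-loop accumulator counting odd numbers up to the limit with the closed form (total_allowed_seat + 1) // 2.
import Mathlib
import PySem

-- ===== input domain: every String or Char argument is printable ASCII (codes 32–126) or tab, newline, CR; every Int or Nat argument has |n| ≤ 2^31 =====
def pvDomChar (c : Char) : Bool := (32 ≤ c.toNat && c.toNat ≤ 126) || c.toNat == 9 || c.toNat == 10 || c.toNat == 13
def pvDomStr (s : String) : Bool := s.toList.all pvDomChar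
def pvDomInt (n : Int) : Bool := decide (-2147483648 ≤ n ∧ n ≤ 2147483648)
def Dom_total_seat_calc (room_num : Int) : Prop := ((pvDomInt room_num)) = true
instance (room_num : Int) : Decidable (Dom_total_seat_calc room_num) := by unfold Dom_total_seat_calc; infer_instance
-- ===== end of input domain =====

-- B replaces A's counting while-loop with the closed form (total_allowed_seat + 1) // 2 (simpler).

-- ===== PORT A =====
-- while i <= total_allowed_seat: cnt += 1; i += 2   — ported as structural recursion on the remaining gap
def total_seat_calc_loop (t : Int) (cnt : Int) (i : Int) : Int :=
  if h : i ≤ t then total_seat_calc_loop t (cnt + 1) (i + 2)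
  else cnt
termination_by (t + 1 - i).toNat
decreasing_by omega

def total_seat_calc (room_num : Int) : Int :=
  let total_allowed_seat : Int :=
    if room_num == 1 then 35
    else if room_num == 2 then 136
    else 42
  total_seat_calc_loop total_allowed_seat 0 1

-- ===== PORT B =====
def total_seat_calc_alt (room_num : Int) : Int :=
  let total_allowed_seat : Int :=
    if room_num == 1 then 35
    else if room_num == 2 then 136
    else 42
  PySem.Int.floordiv (total_allowed_seat + 1) 2

-- ===== PRECONDITION & SPEC =====
def Spec_total_seat_calc (room_num : Int) (out : Int) : Prop := out = total_seat_calc_alt room_num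
instance (room_num : Int) (out : Int) : Decidable (Spec_total_seat_calc room_num out) := by unfold Spec_total_seat_calc; infer_instance

-- ===== CLAIM =====
def Claim_equal_total_seat_calc : Prop := ∀ (room_num : Int), Dom_total_seat_calc room_num → Spec_total_seat_calc room_num (total_seat_calc room_num)

-- ===== LEMMAS AND PROOFS =====
-- the loop counts (t - i).toNat/2 + 1 more steps when i ≤ t
theorem loop_closed (t cnt i : Int) : total_seat_calc_loop t cnt i =
    cnt + (if i ≤ t then ((t - i) / 2 + 1 : Int) else 0) := by
  by_cases h : i ≤ t
  · rw [total_seat_calc_loop]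
    simp only [h, dif_pos, if_pos]
    rw [loop_closed t (cnt + 1) (i + 2)]
    split_ifs with h2 <;> omega
  · rw [total_seat_calc_loop]
    simp [h]
termination_by (t + 1 - i).toNat
decreasing_by omega

-- ===== VERDICT =====
theorem total_seat_calc_spec : Claim_equal_total_seat_calc := by
  intro r _
  unfold Spec_total_seat_calc total_seat_calc total_seat_calc_alt
  split_ifs <;> rw [loop_closed] <;> norm_num [PySem.Int.floordiv] <;> decide
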